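-- pv_equiv track=rewrite | github.com/ItamarRocha/DailyByte | week_9/day61_lunchtime.py | lunchtime
-- ===== SOURCE A (Python) =====
-- def lunchtime(items):
--     count = 0
--     total_lunchs = 0
--     for el in items:
--         if el == "F":
--             count -= 1
--         else:
--             count += 1
--         if count == 0:
--             total_lunchs += 1
--     return total_lunchs
-- ===== SOURCE B (Python) =====
-- def lunchtime(items):
--     def go(lo, hi, base):
--         # returns (sum of steps in items[lo:hi], number of zero balances
--         #  among the prefixes ending inside items[lo:hi], given incoming balance `base`)
--         if hi - lo == 0:
--             return (0, 0)
--         if hi - lo == 1: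
--             x = -1 if items[lo] == "F" else 1
--             return (x, 1 if base + x == 0 else 0)
--         mid = (lo + hi) // 2
--         s1, z1 = go(lo, mid, base)
--         s2, z2 = go(mid, hi, base + s1)
--         return (s1 + s2, z1 + z2)
--     return go(0, len(items), 0)[1]
-- ===== Notes on version B (the rewrite author's own statement) =====
-- stated objective: alternative
-- what changed: Replaces A's fused left-to-right state-machine loop with a divide-and-conquer recursion that splits the range in half, returns (segment sum, zero-balance count) for each half, and combines them by offsetting the right half's base by the left half's sum.
import Mathlib
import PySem

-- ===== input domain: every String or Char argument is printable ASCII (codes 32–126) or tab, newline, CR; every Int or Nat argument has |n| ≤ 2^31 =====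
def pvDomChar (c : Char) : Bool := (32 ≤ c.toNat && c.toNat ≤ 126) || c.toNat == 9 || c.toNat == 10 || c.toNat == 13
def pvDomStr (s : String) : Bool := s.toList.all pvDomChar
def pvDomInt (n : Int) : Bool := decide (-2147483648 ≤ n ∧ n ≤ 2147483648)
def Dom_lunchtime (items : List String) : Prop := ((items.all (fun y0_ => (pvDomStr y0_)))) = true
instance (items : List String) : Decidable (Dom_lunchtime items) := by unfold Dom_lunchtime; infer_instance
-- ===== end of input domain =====

-- B computes the same count by divide-and-conquer (split in half, combine with an
-- offset) instead of A's fused left-to-right state-machine loop; same O(n) result.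

-- ===== PORT A =====
-- one fused loop over items carrying (count, total_lunchs)
def lunchtime (items : List String) : Int :=
  (items.foldl
    (fun (st : Int × Int) el =>
      let count := if el == "F" then st.1 - 1 else st.1 + 1
      (count, if count = 0 then st.2 + 1 else st.2))
    (0, 0)).2

-- ===== PORT B =====
-- go(lo,hi,base) of Source B: here the segment items[lo:hi] is the list argument;
-- returns (sum of steps, number of zero balances) given incoming balance `base`
def pvGo : List Int → Int → Int × Int
  | [], _ => (0, 0)
  | [x], base => (x, if base + x = 0 then 1 else 0)
  | x :: y :: rest, base =>
      let xs := x :: y :: rest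
      let mid := xs.length / 2
      let p1 := pvGo (xs.take mid) base
      let p2 := pvGo (xs.drop mid) (base + p1.1)
      (p1.1 + p2.1, p1.2 + p2.2)
  termination_by xs _ => xs.length
  decreasing_by
    · simp [List.length_take]; omega
    · simp [List.length_drop]; omega

def lunchtime_alt (items : List String) : Int :=
  (pvGo (items.map (fun el => if el == "F" then (-1 : Int) else 1)) 0).2

-- ===== PRECONDITION & SPEC =====
def Spec_lunchtime (items : List String) (out : Int) : Prop := out = lunchtime_alt items
instance (items : List String) (out : Int) : Decidable (Spec_lunchtime items out) := by unfold Spec_lunchtime; infer_instance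

-- ===== CLAIM (what is proved, stated in full; the proofs are below) =====
def Claim_equal_lunchtime : Prop := ∀ (items : List String), Dom_lunchtime items → Spec_lunchtime items (lunchtime items)

-- ===== LEMMAS AND PROOFS =====
-- sequential zero-count, the common reference point of both ports
def linZeros : List Int → Int → Int
  | [], _ => 0
  | x :: xs, b => (if b + x = 0 then 1 else 0) + linZeros xs (b + x)

theorem linZeros_append (l r : List Int) (b : Int) :
    linZeros (l ++ r) b = linZeros l b + linZeros r (b + l.sum) := by
  induction l generalizing b with
  | nil => simp [linZeros]
  | cons x xs ih =>
    simp only [List.cons_append, linZeros, ih, List.sum_cons]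
    ring_nf

theorem pvGo_eq : ∀ (n : ℕ) (xs : List Int), xs.length = n → ∀ b, pvGo xs b = (xs.sum, linZeros xs b) := by
  intro n
  induction n using Nat.strong_induction_on with
  | _ n ih =>
    intro xs hlen b
    match xs, hlen with
    | [], _ => simp [pvGo, linZeros]
    | [x], _ => simp [pvGo, linZeros]
    | x :: y :: rest, hlen =>
      rw [pvGo]
      have h := List.take_append_drop ((x :: y :: rest).length / 2) (x :: y :: rest)
      have h1 : (List.take ((x :: y :: rest).length / 2) (x :: y :: rest)).length < n := by
        simp only [List.length_take, List.length_cons] at hlen ⊢; omega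
      have h2 : (List.drop ((x :: y :: rest).length / 2) (x :: y :: rest)).length < n := by
        simp only [List.length_drop, List.length_cons] at hlen ⊢; omega
      simp only [ih _ h1 _ rfl, ih _ h2 _ rfl]
      rw [← List.sum_append, ← linZeros_append, h]

theorem lunchtime_loop_eq (items : List String) (c t : Int) :
    (items.foldl
      (fun (st : Int × Int) el =>
        let count := if el == "F" then st.1 - 1 else st.1 + 1
        (count, if count = 0 then st.2 + 1 else st.2))
      (c, t)).2
    = t + linZeros (items.map (fun el => if el == "F" then (-1 : Int) else 1)) c := by
  induction items generalizing c t with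
  | cons el rest ih =>
    simp only [List.foldl_cons, List.map_cons, linZeros]
    by_cases hF : el == "F"
    · rw [if_pos hF, if_pos hF, ih, show c + -1 = c - 1 from by ring]
      split_ifs <;> omega
    · rw [if_neg hF, if_neg hF, ih]
      split_ifs <;> omega
  | nil => simp [linZeros]

-- ===== VERDICT (by name: the statement is the Claim_ definition above) =====
theorem lunchtime_spec : Claim_equal_lunchtime := by
  intro items _
  unfold Spec_lunchtime lunchtime lunchtime_alt
  rw [lunchtime_loop_eq, pvGo_eq _ _ rfl]
  simp
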